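-- pv_equiv track=rewrite | github.com/daniel-reich/turbo-robot | GC7JWFhDdhyTsptZ8_3.py | sexy_primes
-- ===== SOURCE A (Python) =====
-- def sexy_primes(n, limit):
--   primes = []
--
--   for i in range(1, limit):
--     no_prime = False
--     for p in primes:
--       if p != 1 and i % p == 0:
--         no_prime = True
--         break
--
--     if no_prime:
--       continue
--     else:
--       primes.append(i)
--   matches = []
--   additions = 6 * (n -1) + 1
--
--   for i in range(0, len(primes)):
--     p = primes[i]
--     if p == 1:
--       continue
--     current = []
--     for i in range(p, (p + additions), 6):
--       if i in primes:
--         current.append(i)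
--
--     if len(current) == n:
--       matches.append(current)
--   result = []
--   for m in matches:
--     result.append(tuple(m))
--   return result
-- ===== SOURCE B (Python) =====
-- def sexy_primes(n, limit):
--     def is_prime(k):
--         if k < 2:
--             return False
--         d = 2
--         while d * d <= k:
--             if k % d == 0:
--                 return False
--             d += 1
--         return True
--
--     primes = [k for k in range(2, limit) if is_prime(k)]
--     prime_set = set(primes)
--     if n < 0:
--         return []
--     result = []
--     for p in primes:
--         chain = [p + 6 * k for k in range(n)]
--         if all(q in prime_set for q in chain):
--             result.append(tuple(chain))
--     return result
-- ===== Notes on version B (the rewrite author's own statement) =====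
-- stated objective: faster
-- what changed: A builds its prime list by trial-dividing each i by every previously found prime and answers chain-membership queries by scanning that list; B tests each candidate with sqrt-bounded trial division, looks chain members up in a set, and builds each length-n candidate chain directly instead of filtering a stride-6 range and counting.
import Mathlib
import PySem

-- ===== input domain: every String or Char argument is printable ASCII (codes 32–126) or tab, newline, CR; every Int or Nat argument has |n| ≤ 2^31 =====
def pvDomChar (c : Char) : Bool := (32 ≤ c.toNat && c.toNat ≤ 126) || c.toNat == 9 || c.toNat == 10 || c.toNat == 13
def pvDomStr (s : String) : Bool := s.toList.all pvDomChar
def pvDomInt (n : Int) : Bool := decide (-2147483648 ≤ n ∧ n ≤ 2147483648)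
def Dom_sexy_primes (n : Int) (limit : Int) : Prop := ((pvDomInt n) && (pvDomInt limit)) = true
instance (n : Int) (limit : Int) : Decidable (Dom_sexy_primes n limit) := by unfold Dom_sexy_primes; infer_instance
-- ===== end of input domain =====

-- B replaces A's divide-by-every-previous-prime prime generation and linear list-membership
-- chain lookups by a sqrt-bounded trial-division primality test and a set lookup (objective: faster).

-- ===== PORT A =====
-- inner 'for p in primes: … break' loop setting the no_prime flag
def pvANoPrime (primes : List Int) (i : Int) : Bool :=
  primes.any (fun p => p != 1 && PySem.Int.mod i p == 0)

-- first loop of A: build the 'primes' list (which also contains 1)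
def pvAPrimes (limit : Int) : List Int :=
  (PySem.List.pyRange 1 limit 1).foldl
    (fun primes i => if pvANoPrime primes i then primes else primes ++ [i]) []

-- body of A's second loop: skip p == 1, collect 'current', append it when len(current) == n
def pvAMatchStep (n : Int) (primes : List Int) (acc : List (List Int)) (p : Int) : List (List Int) :=
  if p == 1 then acc
  else
    let current := (PySem.List.pyRange p (p + (6 * (n - 1) + 1)) 6).foldl
      (fun cur j => if primes.contains j then cur ++ [j] else cur) []
    if ((current.length : Int) == n) then acc ++ [current] else acc

def sexy_primes (n : Int) (limit : Int) : List (List Int) :=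
  ((PySem.List.pyRange 0 ((pvAPrimes limit).length : Int) 1).foldl
      (fun acc i => pvAMatchStep n (pvAPrimes limit) acc (PySem.List.pyGetD (pvAPrimes limit) i 0)) []).foldl
    (fun res m => res ++ [m]) []

-- ===== PORT B =====
-- while d * d <= k: …
def pvBTrial (k : Int) (d : Int) : Bool :=
  if d * d ≤ k then
    if PySem.Int.mod k d == 0 then false else pvBTrial k (d + 1)
  else true
termination_by (k + 1 - d).toNat
decreasing_by
  have hdk : d ≤ k := by
    by_cases h0 : d ≤ 0
    · nlinarith
    · nlinarith
  omega

def pvBIsPrime (k : Int) : Bool := if k < 2 then false else pvBTrial k 2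

def pvBPrimes (limit : Int) : List Int :=
  (PySem.List.pyRange 2 limit 1).filter pvBIsPrime

-- body of B's loop: build the candidate chain, keep it when every member is in the prime set
def pvBStep (n : Int) (primeSet : PySem.Set Int) (res : List (List Int)) (p : Int) : List (List Int) :=
  let chain := (PySem.List.pyRange 0 n 1).map (fun k => p + 6 * k)
  if chain.all (fun q => PySem.Set.contains primeSet q) then res ++ [chain] else res

def sexy_primes_alt (n : Int) (limit : Int) : List (List Int) :=
  if n < 0 then []
  else (pvBPrimes limit).foldl (pvBStep n (PySem.Set.ofList (pvBPrimes limit))) []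

-- ===== PRECONDITION & SPEC =====
def Spec_sexy_primes (n : Int) (limit : Int) (out : List (List Int)) : Prop := out = sexy_primes_alt n limit
instance (n : Int) (limit : Int) (out : List (List Int)) : Decidable (Spec_sexy_primes n limit out) := by unfold Spec_sexy_primes; infer_instance

-- ===== CLAIM (what is proved, stated in full; the proofs are below) =====
def Claim_equal_sexy_primes : Prop := ∀ (n : Int) (limit : Int), Dom_sexy_primes n limit → Spec_sexy_primes n limit (sexy_primes n limit)

-- ===== LEMMAS AND PROOFS =====

-- B's while loop succeeds iff no trial divisor ≥ d with square ≤ k divides k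
lemma pvBTrial_iff (k d : Int) (hd : 0 < d) :
    pvBTrial k d = true ↔ ∀ e : Int, d ≤ e → e * e ≤ k → ¬ (e ∣ k) := by
  fun_induction pvBTrial k d with
  | case1 d hle hmod =>
    simp only [Bool.false_eq_true, false_iff]
    push Not
    refine ⟨d, le_refl d, hle, ?_⟩
    rw [beq_iff_eq] at hmod
    exact (PySem.Int.mod_eq_zero_iff_dvd k d).mp hmod
  | case2 d hle hmod ih =>
    rw [ih (by omega)]
    constructor
    · intro h e hde hek
      rcases eq_or_lt_of_le hde with heq | hlt
      · intro hdvd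
        exact hmod (by rw [beq_iff_eq]; exact (PySem.Int.mod_eq_zero_iff_dvd k d).mpr (by rw [heq]; exact hdvd))
      · exact h e (by omega) hek
    · intro h e hde hek
      exact h e (by omega) hek
  | case3 d hle =>
    simp only [true_iff]
    intro e hde hek
    exfalso
    have : d * d ≤ e * e := by nlinarith
    linarith

-- B's primality test decides primality of k.toNat (for k ≥ 2)
lemma pvBIsPrime_iff (k : Int) : pvBIsPrime k = true ↔ 2 ≤ k ∧ Nat.Prime k.toNat := by
  unfold pvBIsPrime
  by_cases hk : k < 2
  · simp only [if_pos hk, Bool.false_eq_true, false_iff]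
    rintro ⟨h2, -⟩
    omega
  · simp only [if_neg hk]
    have h2k : 2 ≤ k := by omega
    have hcast : ((k.toNat : Int)) = k := by omega
    rw [pvBTrial_iff k 2 (by omega)]
    constructor
    · intro h
      refine ⟨h2k, ?_⟩
      rw [Nat.prime_def_le_sqrt]
      refine ⟨by omega, ?_⟩
      intro m hm hsq hdvd
      have hmm : (m : Int) * (m : Int) ≤ k := by
        have h1 : m * m ≤ k.toNat := Nat.le_sqrt.mp hsq
        have h2 : ((m * m : Nat) : Int) ≤ ((k.toNat : Nat) : Int) := Int.ofNat_le.mpr h1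
        push_cast at h2
        rwa [hcast] at h2
      exact h (m : Int) (by exact_mod_cast hm) hmm
        (by rw [← hcast]; exact_mod_cast hdvd)
    · rintro ⟨-, hp⟩ e he2 hek hdvd
      have he0 : (0 : Int) ≤ e := by omega
      have hte : ((e.toNat : Int)) = e := Int.toNat_of_nonneg he0
      have hdn : e.toNat ∣ k.toNat := by
        rw [← Int.natCast_dvd_natCast, hte, hcast]
        exact hdvd
      have hsq' : e.toNat * e.toNat ≤ k.toNat := by
        zify
        rw [hte, hcast]
        exact hek
      have hsq : e.toNat ≤ k.toNat.sqrt := Nat.le_sqrt.mpr hsq'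
      exact (Nat.prime_def_le_sqrt.mp hp).2 e.toNat (by omega) hsq hdn

lemma mem_pvBPrimes (limit q : Int) :
    q ∈ pvBPrimes limit ↔ 2 ≤ q ∧ q < limit ∧ Nat.Prime q.toNat := by
  unfold pvBPrimes
  rw [List.mem_filter, PySem.List.mem_pyRange_one, pvBIsPrime_iff]
  constructor
  · rintro ⟨⟨h1, h2⟩, -, h3⟩
    exact ⟨h1, h2, h3⟩
  · rintro ⟨h1, h2, h3⟩
    exact ⟨⟨h1, h2⟩, h1, h3⟩

-- an i ≥ 2 has a prime divisor below it iff it is not prime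
lemma exists_div_iff_not_prime (L : Int) (hL : 2 ≤ L) :
    (∃ p ∈ pvBPrimes L, p ∣ L) ↔ ¬ Nat.Prime L.toNat := by
  have hcast : ((L.toNat : Int)) = L := by omega
  constructor
  · rintro ⟨p, hp, hdvd⟩ hprime
    rw [mem_pvBPrimes] at hp
    obtain ⟨hp2, hpL, hpprime⟩ := hp
    have hdn : p.toNat ∣ L.toNat := by
      rw [← Int.natCast_dvd_natCast, Int.toNat_of_nonneg (by omega : (0:Int) ≤ p), hcast]
      exact hdvd
    rcases (Nat.Prime.eq_one_or_self_of_dvd hprime p.toNat hdn) with h1 | h1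
    · omega
    · omega
  · intro hnp
    set q := L.toNat.minFac with hq
    have hq1 : L.toNat ≠ 1 := by omega
    have hqprime : Nat.Prime q := Nat.minFac_prime hq1
    have hqdvd : q ∣ L.toNat := Nat.minFac_dvd L.toNat
    have hqle : q ≤ L.toNat := Nat.minFac_le (by omega)
    have hqne : q ≠ L.toNat := by
      intro h
      exact hnp (Nat.prime_def_minFac.mpr ⟨by omega, h⟩)
    refine ⟨(q : Int), ?_, ?_⟩
    · rw [mem_pvBPrimes]
      refine ⟨by exact_mod_cast hqprime.two_le, by omega, ?_⟩
      simpa using hqprime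
    · rw [← hcast]
      exact_mod_cast hqdvd

-- A's trial division against the primes collected so far is B's primality test, negated
lemma pvANoPrime_eq (L : Int) (hL : 2 ≤ L) :
    pvANoPrime (1 :: pvBPrimes L) L = !pvBIsPrime L := by
  rw [Bool.eq_iff_iff]
  unfold pvANoPrime
  rw [List.any_cons]
  simp only [bne_self_eq_false, Bool.false_and, Bool.false_or]
  rw [List.any_eq_true, Bool.not_eq_true', ← Bool.not_eq_true, pvBIsPrime_iff,
    not_and, ← exists_div_iff_not_prime L hL]
  constructor
  · rintro ⟨p, hp, hcond⟩
    intro _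
    refine ⟨p, hp, ?_⟩
    simp only [Bool.and_eq_true, beq_iff_eq] at hcond
    exact (PySem.Int.mod_eq_zero_iff_dvd L p).mp hcond.2
  · intro h
    obtain ⟨p, hp, hdvd⟩ := h hL
    have hp2 : 2 ≤ p := ((mem_pvBPrimes L p).mp hp).1
    refine ⟨p, hp, ?_⟩
    simp only [Bool.and_eq_true, beq_iff_eq, bne_iff_ne]
    exact ⟨by omega, (PySem.Int.mod_eq_zero_iff_dvd L p).mpr hdvd⟩

lemma pvBPrimes_succ (L : Int) (hL : 2 ≤ L) :
    pvBPrimes (L + 1) = pvBPrimes L ++ (if pvBIsPrime L then [L] else []) := by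
  unfold pvBPrimes
  rw [PySem.List.pyRange_one_succ_right (by omega), List.filter_append]
  simp [List.filter_cons]

-- A's accumulated primes list is exactly 1 followed by the primes below limit
lemma pvAPrimes_eq (limit : Int) (h2 : 2 ≤ limit) :
    pvAPrimes limit = 1 :: pvBPrimes limit := by
  obtain ⟨m, rfl⟩ : ∃ m : Nat, limit = 2 + m := ⟨(limit - 2).toNat, by omega⟩
  clear h2
  induction m with
  | zero =>
    decide
  | succ t ih =>
    have hL : ((2 : Int) + ((t : Nat) + 1 : Nat)) = (2 + (t : Int)) + 1 := by push_cast; ring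
    have hstep : pvAPrimes (2 + ((t : Nat) + 1 : Nat) : Int) =
        (if pvANoPrime (pvAPrimes (2 + (t : Int))) (2 + (t : Int))
          then pvAPrimes (2 + (t : Int))
          else pvAPrimes (2 + (t : Int)) ++ [2 + (t : Int)]) := by
      unfold pvAPrimes
      rw [hL, PySem.List.pyRange_one_succ_right (by omega), List.foldl_append]
      rfl
    rw [hstep, ih, hL, pvBPrimes_succ _ (by omega), pvANoPrime_eq _ (by omega)]
    cases h : pvBIsPrime (2 + (t : Int)) <;> simp

-- A's inner range(p, p + additions, 6) enumerates the same n candidates B maps over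
lemma candidates_eq (p n : Int) (hn : 0 ≤ n) :
    PySem.List.pyRange p (p + (6 * (n - 1) + 1)) 6
      = (PySem.List.pyRange 0 n 1).map (fun k => p + 6 * k) := by
  rw [PySem.List.pyRange_of_pos p _ (by norm_num), PySem.List.pyRange_one 0 n, List.map_map]
  by_cases hn1 : 1 ≤ n
  · rw [if_pos (by omega)]
    have harith : p + (6 * (n - 1) + 1) - p + 6 - 1 = 6 * n := by ring
    rw [harith, Int.mul_ediv_cancel_left _ (by norm_num)]
    simp
  · rw [if_neg (by omega)]
    have : n = 0 := by omega
    subst this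
    simp

-- for n < 0 every iteration of A's second loop is a no-op
lemma pvAMatchStep_neg (n : Int) (hn : n < 0) (primes : List Int) (acc : List (List Int)) (p : Int) :
    pvAMatchStep n primes acc p = acc := by
  unfold pvAMatchStep
  by_cases hp : p == 1
  · rw [if_pos hp]
  · rw [if_neg hp]
    have hempty : PySem.List.pyRange p (p + (6 * (n - 1) + 1)) 6 = [] := by
      rw [PySem.List.pyRange_of_pos p _ (by norm_num), if_neg (by omega)]
      simp
    rw [hempty]
    simp only [List.foldl_nil, List.length_nil, Nat.cast_zero]
    rw [if_neg (by simp; omega)]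

-- on a prime p < limit, one iteration of A's loop body equals one iteration of B's
lemma step_eq (n limit : Int) (hn : 0 ≤ n) (p : Int) (hp : p ∈ pvBPrimes limit)
    (acc : List (List Int)) :
    pvAMatchStep n (1 :: pvBPrimes limit) acc p
      = pvBStep n (PySem.Set.ofList (pvBPrimes limit)) acc p := by
  obtain ⟨hp2, hpl, hpprime⟩ := (mem_pvBPrimes limit p).mp hp
  unfold pvAMatchStep pvBStep
  rw [if_neg (by simp; omega)]
  rw [candidates_eq p n hn, PySem.List.foldl_append_if_eq_filter, List.nil_append]
  set cands := (PySem.List.pyRange 0 n 1).map (fun k => p + 6 * k) with hcands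
  have hmemge : ∀ j ∈ cands, 2 ≤ j := by
    intro j hj
    rw [hcands, List.mem_map] at hj
    obtain ⟨k, hk, rfl⟩ := hj
    have := (PySem.List.mem_pyRange_one.mp hk).1
    omega
  have hcontains : ∀ j ∈ cands,
      (1 :: pvBPrimes limit).contains j = PySem.Set.contains (PySem.Set.ofList (pvBPrimes limit)) j := by
    intro j hj
    have hj2 := hmemge j hj
    rw [Bool.eq_iff_iff, List.contains_iff_mem, List.mem_cons, PySem.Set.contains_iff,
      PySem.Set.mem_ofList]
    constructor
    · rintro (h1 | h) <;> [omega; exact h]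
    · intro h
      exact Or.inr h
  rw [List.filter_congr hcontains]
  have hlen : cands.length = n.toNat := by
    rw [hcands, List.length_map, PySem.List.length_pyRange_one]
    omega
  simp only []
  by_cases hall : ∀ q ∈ cands, (PySem.Set.ofList (pvBPrimes limit)).contains q = true
  · rw [List.filter_eq_self.mpr hall, if_pos (List.all_eq_true.mpr hall),
      if_pos (by rw [beq_iff_eq]; omega)]
  · have hlt : (cands.filter (PySem.Set.ofList (pvBPrimes limit)).contains).length ≠ cands.length := by
      intro heq
      exact hall (List.length_filter_eq_length_iff.mp heq)
    have hle := List.length_filter_le ((PySem.Set.ofList (pvBPrimes limit)).contains) cands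
    rw [if_neg (by rw [beq_iff_eq]; omega), if_neg (by rw [List.all_eq_true]; exact hall)]

-- ===== VERDICT (by name: the statement is the Claim_ definition above) =====
theorem sexy_primes_spec : Claim_equal_sexy_primes := by
  unfold Claim_equal_sexy_primes Spec_sexy_primes
  intro n limit _
  unfold sexy_primes sexy_primes_alt
  rw [PySem.List.foldl_pyRange_zero_pyGetD' (pvAPrimes limit) 0
      (pvAMatchStep n (pvAPrimes limit)) [],
    PySem.List.foldl_append_singleton_eq_self, List.nil_append]
  by_cases hn : n < 0
  · rw [if_pos hn]
    rw [PySem.List.foldl_congr_mem _ _ (fun acc _ => acc) []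
      (fun acc x _ => pvAMatchStep_neg n hn _ acc x)]
    exact List.foldl_fixed _
  · rw [if_neg hn]
    by_cases h2 : 2 ≤ limit
    · rw [pvAPrimes_eq limit h2, List.foldl_cons]
      have h1 : pvAMatchStep n (1 :: pvBPrimes limit) [] 1 = [] := by
        unfold pvAMatchStep
        rw [if_pos (by simp)]
      rw [h1]
      exact PySem.List.foldl_congr_mem _ _ _ []
        (fun acc x hx => step_eq n limit (by omega) x hx acc)
    · have hA : pvAPrimes limit = [] := by
        unfold pvAPrimes
        rw [PySem.List.pyRange_one_eq_nil (by omega)]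
        rfl
      have hB : pvBPrimes limit = [] := by
        unfold pvBPrimes
        rw [PySem.List.pyRange_one_eq_nil (by omega)]
        rfl
      rw [hA, hB]
      rfl
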